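-- pv_equiv track=rewrite | github.com/kenanAST/bin-packing | evaluate_online.py | _oscillate
-- ===== SOURCE A (Python) =====
-- def _oscillate(items):
--     """Alternate between large and small items."""
--     s = sorted(items)
--     result = []
--     lo, hi = 0, len(s) - 1
--     toggle = True
--     while lo <= hi:
--         if toggle:
--             result.append(s[hi])
--             hi -= 1
--         else:
--             result.append(s[lo])
--             lo += 1
--         toggle = not toggle
--     return result
-- ===== SOURCE B (Python) =====
-- def _oscillate(items):
--     """Alternate between large and small items."""
--     s = sorted(items)
--     n = len(s)
--     highs = s[::-1][:(n + 1) // 2]   # top ceil(n/2), descending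
--     lows = s[:n // 2]                # bottom floor(n/2), ascending
--     result = []
--     for i in range(len(highs)):
--         result.append(highs[i])
--         if i < len(lows):
--             result.append(lows[i])
--     return result
-- ===== Notes on version B (the rewrite author's own statement) =====
-- stated objective: alternative
-- what changed: Replaces the two-pointer toggle loop with a pre-split of the sorted list into a descending high half and an ascending low half that are then interleaved.
import Mathlib
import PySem

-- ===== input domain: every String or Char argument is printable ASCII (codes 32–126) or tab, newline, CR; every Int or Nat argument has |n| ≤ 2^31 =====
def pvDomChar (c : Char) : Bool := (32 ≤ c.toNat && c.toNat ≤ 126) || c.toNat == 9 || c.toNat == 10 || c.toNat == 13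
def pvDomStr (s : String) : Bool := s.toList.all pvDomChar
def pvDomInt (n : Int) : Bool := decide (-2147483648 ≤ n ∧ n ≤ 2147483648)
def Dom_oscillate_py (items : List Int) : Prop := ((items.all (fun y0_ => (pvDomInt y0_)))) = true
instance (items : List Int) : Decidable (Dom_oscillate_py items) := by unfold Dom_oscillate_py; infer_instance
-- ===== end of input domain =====

-- B replaces A's two-pointer toggle loop by pre-splitting the sorted list into a
-- descending high half and an ascending low half and interleaving them (alternative decomposition, same cost).


-- ===== PORT A =====
-- the while loop: lo, hi indices into s, toggle alternates; s[hi]/s[lo] are always in range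
def oscLoopA (s : List Int) (lo hi : Int) (toggle : Bool) (acc : List Int) : List Int :=
  if lo ≤ hi then
    if toggle then
      oscLoopA s lo (hi - 1) false (acc ++ [PySem.List.pyGetD s hi 0])
    else
      oscLoopA s (lo + 1) hi true (acc ++ [PySem.List.pyGetD s lo 0])
  else acc
termination_by (hi + 1 - lo).toNat
decreasing_by all_goals omega

def oscillate_py (items : List Int) : List Int :=
  oscLoopA (PySem.List.sorted items (fun x => x) false) 0 (items.length - 1) true []

-- ===== PORT B =====
-- the for-loop over highs' indices, appending lows[i] while i < len(lows)
def ilvB : List Int → List Int → List Int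
  | [], _ => []
  | h :: hs, [] => h :: ilvB hs []
  | h :: hs, l :: ls => h :: l :: ilvB hs ls

def oscillate_py_alt (items : List Int) : List Int :=
  let s := PySem.List.sorted items (fun x => x) false
  let n := s.length
  ilvB (s.reverse.take ((n + 1) / 2)) (s.take (n / 2))

-- ===== PRECONDITION & SPEC =====
def Spec_oscillate_py (items : List Int) (out : List Int) : Prop := out = oscillate_py_alt items
instance (items : List Int) (out : List Int) : Decidable (Spec_oscillate_py items out) := by unfold Spec_oscillate_py; infer_instance

-- ===== CLAIM (what is proved, stated in full; the proofs are below) =====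
def Claim_equal_oscillate_py : Prop := ∀ (items : List Int), Dom_oscillate_py items → Spec_oscillate_py items (oscillate_py items)

-- ===== LEMMAS AND PROOFS =====

-- functional reading of A's loop: pick the last element (tog = true) or the first (tog = false), alternating
def osc (t : List Int) (tog : Bool) : List Int :=
  if h : t = [] then []
  else if tog then t.getLast h :: osc t.dropLast false
  else t.head h :: osc t.tail true
termination_by t.length
decreasing_by
  · rw [List.length_dropLast]; have := List.length_pos_of_ne_nil h; omega
  · have := List.length_pos_of_ne_nil h; simp [List.length_tail]; omega

lemma osc_cons_true (t : List Int) (h : t ≠ []) :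
    osc t true = t.getLast h :: osc t.dropLast false := by
  rw [osc]; simp [h]

lemma osc_cons_false (t : List Int) (h : t ≠ []) :
    osc t false = t.head h :: osc t.tail true := by
  rw [osc]; simp [h]

lemma oscLoopA_spec (s : List Int) (n : Nat) (lo hi : Int) (acc : List Int)
    (h0 : 0 ≤ lo) (hn : (hi + 1 - lo).toNat = n) (hhi : hi < s.length) :
    (oscLoopA s lo hi true acc = acc ++ osc ((s.drop lo.toNat).take n) true) ∧
    (oscLoopA s lo hi false acc = acc ++ osc ((s.drop lo.toNat).take n) false) := by
  induction n using Nat.strong_induction_on generalizing lo hi acc with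
  | _ n ih =>
    by_cases hle : lo ≤ hi
    · have hn1 : 1 ≤ n := by omega
      have hlt : lo.toNat < s.length := by omega
      have hseglen : ((s.drop lo.toNat).take n).length = n := by
        simp; omega
      have hne : (s.drop lo.toNat).take n ≠ [] := by
        intro hh; rw [hh] at hseglen; simp at hseglen; omega
      constructor
      · rw [oscLoopA]
        simp only [hle, if_true]
        have hrec := (ih (n - 1) (by omega) lo (hi - 1) (acc ++ [PySem.List.pyGetD s hi 0])
          h0 (by omega) (by omega)).2
        rw [hrec, osc_cons_true _ hne]
        have hdl : ((s.drop lo.toNat).take n).dropLast = (s.drop lo.toNat).take (n - 1) := by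
          rw [List.dropLast_eq_take, hseglen, List.take_take]
          congr 1; omega
        have hhead : PySem.List.pyGetD s hi 0 = ((s.drop lo.toNat).take n).getLast hne := by
          rw [PySem.List.pyGetD_eq_getElem s 0 (by omega) hhi, List.getLast_eq_getElem]
          simp only [List.getElem_take, List.getElem_drop, hseglen]
          congr 1; omega
        rw [hdl, hhead]; simp
      · rw [oscLoopA]
        simp only [hle, if_true]
        have hrec := (ih (n - 1) (by omega) (lo + 1) hi (acc ++ [PySem.List.pyGetD s lo 0])
          (by omega) (by omega) hhi).1
        rw [hrec, osc_cons_false _ hne]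
        have htl : ((s.drop lo.toNat).take n).tail = (s.drop (lo + 1).toNat).take (n - 1) := by
          rw [← List.drop_one, List.drop_take, List.drop_drop]
          have h1 : (lo + 1).toNat = lo.toNat + 1 := by omega
          rw [h1]
        have hhead : PySem.List.pyGetD s lo 0 = ((s.drop lo.toNat).take n).head hne := by
          rw [PySem.List.pyGetD_eq_getElem s 0 h0 (by omega), List.head_eq_getElem]
          simp only [List.getElem_take, List.getElem_drop]
          congr 1
        rw [htl, hhead]; simp
    · have hn0 : n = 0 := by omega
      subst hn0
      constructor <;> (rw [oscLoopA]; simp [hle, osc])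

-- B's closed form equals the functional reading, for any list
lemma osc_eq_ilvB (t : List Int) :
    osc t true = ilvB (t.reverse.take ((t.length + 1) / 2)) (t.take (t.length / 2)) := by
  induction hn : t.length using Nat.strong_induction_on generalizing t with
  | _ n ih =>
    match t with
    | [] => subst hn; rw [osc]; simp [ilvB]
    | [a] => subst hn; rw [osc, osc]; simp [ilvB]
    | a :: b :: u =>
      subst hn
      set t' := a :: b :: u with ht'
      have hne : t' ≠ [] := by simp [ht']
      have hlen : t'.length = u.length + 2 := by simp [ht']
      set m := (b :: u).dropLast with hm
      have hdl : t'.dropLast = a :: m := by simp [ht', hm]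
      have hmlen : m.length = u.length := by simp [hm]
      -- left side: two steps of osc
      rw [osc_cons_true t' hne, hdl, osc_cons_false _ (by simp), List.head_cons, List.tail_cons]
      rw [ih m.length (by omega) m rfl]
      -- right side: one interleave step
      have hrev : t'.reverse = t'.getLast hne :: t'.dropLast.reverse := by
        conv_lhs => rw [← List.dropLast_concat_getLast hne]
        simp
      have hk1 : (t'.length + 1) / 2 = (m.length + 1) / 2 + 1 := by omega
      have hk2 : t'.length / 2 = m.length / 2 + 1 := by omega
      have htake1 : t'.reverse.take ((t'.length + 1) / 2)
          = t'.getLast hne :: (m.reverse.take ((m.length + 1) / 2)) := by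
        rw [hrev, hk1, List.take_succ_cons]
        congr 1
        rw [hdl]
        have h2 : (a :: m).reverse = m.reverse ++ [a] := by simp
        rw [h2, List.take_append_of_le_length (by simp; omega)]
      have htake2 : t'.take (t'.length / 2) = a :: m.take (m.length / 2) := by
        rw [hk2, ht']
        simp only [List.take_succ_cons]
        congr 1
        have hbu : b :: u = m ++ [(b :: u).getLast (by simp)] := by
          rw [hm]; exact (List.dropLast_concat_getLast _).symm
        conv_lhs => rw [hbu]
        rw [List.take_append_of_le_length (by rw [hmlen]; omega)]
      rw [htake1, htake2, ilvB]

-- ===== VERDICT (by name: the statement is the Claim_ definition above) =====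
theorem oscillate_py_spec : Claim_equal_oscillate_py := by
  intro items _
  unfold Spec_oscillate_py oscillate_py oscillate_py_alt
  set s := PySem.List.sorted items (fun x => x) false with hs
  have hlen : s.length = items.length := by simp [hs, PySem.List.length_sorted]
  have := (oscLoopA_spec s s.length 0 ((items.length : Int) - 1) []
    (by omega) (by omega) (by omega)).1
  rw [hlen] at this
  rw [this]
  simp only [List.nil_append, Int.toNat_zero, List.drop_zero, ← hlen, List.take_length]
  exact osc_eq_ilvB s
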